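-- pv_equiv track=rewrite | github.com/GosiaMarciniak/PythonTRNG | trng.py | quick_postprocessing
-- ===== SOURCE A (Python) =====
-- def mix_bits(input_bits):
--     if(len(input_bits)<3):
--         return input_bits
--
--     mixed_bits = [input_bits[0],input_bits[1]]
--     curentstep=2
--     while(len(mixed_bits)<len(input_bits)):
--         a=len(mixed_bits)-1
--         b=0
--         if(curentstep+a>len(input_bits)):
--             a=len(input_bits)-curentstep
--         for i in range(a):
--             mixed_bits.insert(b*2+1, input_bits[curentstep])
--             b=b+1
--             curentstep=curentstep+1
--
--     return mixed_bits
--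
-- def xor_operation(input_bits):
--     result = []
--     for i in range(0, len(input_bits), 2):
--         result.append(input_bits[i] ^ input_bits[i+1])
--     return result
--
-- def int_to_bits(n):
--     n = n & 0xF
--     bit_array = [int(bit) for bit in bin(n)[2:]]
--     while len(bit_array) < 4:
--         bit_array.insert(0, 0)
--     return bit_array
--
-- def quick_postprocessing(num_of_values, input_values, start_value):
--     result=[]
--     for i in range(num_of_values):
--         bit_tab = int_to_bits(input_values[start_value+i])
--         mixed_segment = mix_bits(bit_tab)
--         xored_segment = xor_operation(mixed_segment)
--         result.extend(xored_segment)
--     return result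
-- ===== SOURCE B (Python) =====
-- def quick_postprocessing(num_of_values, input_values, start_value):
--     out = []
--     for i in range(num_of_values):
--         m = input_values[start_value + i] & 0xF
--         out.append(((m >> 3) ^ m) & 1)
--         out.append(((m >> 2) ^ (m >> 1)) & 1)
--     return out
-- ===== Notes on version B (the rewrite author's own statement) =====
-- stated objective: simpler
-- what changed: B drops the int_to_bits/mix_bits/xor_operation pipeline (building, permuting and pairwise-XORing intermediate bit lists) and emits the two output bits per value directly as closed-form bit arithmetic on m = value & 0xF: (m>>3)^m & 1 and (m>>2)^(m>>1) & 1.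
import Mathlib
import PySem

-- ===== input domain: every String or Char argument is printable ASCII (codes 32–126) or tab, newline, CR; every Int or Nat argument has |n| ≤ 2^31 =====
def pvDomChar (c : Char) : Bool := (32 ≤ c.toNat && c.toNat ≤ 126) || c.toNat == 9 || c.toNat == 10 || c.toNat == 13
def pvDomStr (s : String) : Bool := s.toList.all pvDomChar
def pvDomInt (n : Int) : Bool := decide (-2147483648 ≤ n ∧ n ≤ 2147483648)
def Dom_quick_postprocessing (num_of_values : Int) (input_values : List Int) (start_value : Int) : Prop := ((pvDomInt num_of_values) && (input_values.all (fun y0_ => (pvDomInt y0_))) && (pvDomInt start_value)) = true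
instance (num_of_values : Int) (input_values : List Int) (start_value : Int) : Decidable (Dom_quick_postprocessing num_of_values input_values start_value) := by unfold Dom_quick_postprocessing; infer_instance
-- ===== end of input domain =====

-- B replaces A's int_to_bits/mix_bits/xor_operation pipeline by closed-form bit arithmetic per value (objective: simpler).

-- ===== PORT A =====
-- bin(n)[2:] digits, MSB-first, for n ≥ 1; fuel-based so the kernel reduces it (fuel 4 suffices: n ≤ 15 here)
def pvBinCore : Nat → Nat → List Int
  | 0, _ => []
  | f + 1, n => if n = 0 then [] else pvBinCore f (n / 2) ++ [((n % 2 : Nat) : Int)]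

-- 'while len(bit_array) < 4: bit_array.insert(0, 0)' with fuel 4 (length ≥ 1 on every call, so fuel never runs out)
def pvPad : Nat → List Int → List Int
  | 0, l => l
  | f + 1, l => if l.length < 4 then pvPad f (0 :: l) else l

-- int_to_bits: n &= 0xF; MSB-first binary digits (bin(0)[2:] = "0"); pad left to 4
def pvIntToBits (n : Int) : List Int :=
  let m := PySem.Int.band n 15
  pvPad 4 (if m.toNat = 0 then [0] else pvBinCore 4 m.toNat)

-- the inner 'for i in range(a)' of mix_bits; input_bits[curentstep] is always in range when called, so getD 0 is exact there
def pvMixFor (input : List Int) : Nat → List Int → Nat → Nat → (List Int × Nat)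
  | 0, mixed, _, cur => (mixed, cur)
  | k + 1, mixed, b, cur =>
      pvMixFor input k (PySem.List.insert mixed ((b * 2 + 1 : Nat) : Int) (PySem.List.pyGetD input (cur : Int) 0)) (b + 1) (cur + 1)

-- the 'while len(mixed_bits) < len(input_bits)' loop; fuel = len(input_bits) bounds its iteration count
def pvMixLoop (input : List Int) : Nat → List Int → Nat → List Int
  | 0, mixed, _ => mixed
  | f + 1, mixed, cur =>
    if mixed.length < input.length then
      let a := mixed.length - 1
      let a := if input.length < cur + a then input.length - cur else a
      let p := pvMixFor input a mixed 0 cur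
      pvMixLoop input f p.1 p.2
    else mixed

def pvMixBits (input : List Int) : List Int :=
  if input.length < 3 then input
  else pvMixLoop input input.length [PySem.List.pyGetD input 0 0, PySem.List.pyGetD input 1 0] 2

-- xor_operation: pairs (i, i+1) for i in range(0, len, 2); only ever called on even-length lists, where pyGetD is exact
def pvXorOp (bits : List Int) : List Int :=
  (PySem.List.pyRange 0 (bits.length : Int) 2).foldl
    (fun r i => r ++ [PySem.Int.bxor (PySem.List.pyGetD bits i 0) (PySem.List.pyGetD bits (i + 1) 0)]) []

-- input_values[start_value + i]: Python raises IndexError when out of range; Pre_ excludes exactly those inputs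
def quick_postprocessing (num_of_values : Int) (input_values : List Int) (start_value : Int) : List Int :=
  (PySem.List.pyRange 0 num_of_values 1).foldl
    (fun result i =>
      let v := (PySem.List.pyGet? input_values (start_value + i)).getD 0
      result ++ pvXorOp (pvMixBits (pvIntToBits v))) []

-- ===== PORT B =====
def quick_postprocessing_alt (num_of_values : Int) (input_values : List Int) (start_value : Int) : List Int :=
  (PySem.List.pyRange 0 num_of_values 1).foldl
    (fun out i =>
      let m := PySem.Int.band ((PySem.List.pyGet? input_values (start_value + i)).getD 0) 15
      out ++ [PySem.Int.band (PySem.Int.bxor (m >>> 3) m) 1,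
              PySem.Int.band (PySem.Int.bxor (m >>> 2) (m >>> 1)) 1]) []

-- ===== PRECONDITION & SPEC =====
-- Pre_ admits exactly the inputs where every index start_value+i (0 ≤ i < num_of_values) is a valid Python index of input_values; outside it A raises IndexError.
def Pre_quick_postprocessing (num_of_values : Int) (input_values : List Int) (start_value : Int) : Prop :=
  num_of_values ≤ 0 ∨ (-(input_values.length : Int) ≤ start_value ∧ start_value + num_of_values ≤ (input_values.length : Int))
instance (num_of_values : Int) (input_values : List Int) (start_value : Int) : Decidable (Pre_quick_postprocessing num_of_values input_values start_value) := by unfold Pre_quick_postprocessing; infer_instance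

def pvWitness_quick_postprocessing : Int × List Int × Int := (2, [3, 10], 0)

def Spec_quick_postprocessing (num_of_values : Int) (input_values : List Int) (start_value : Int) (out : List Int) : Prop := out = quick_postprocessing_alt num_of_values input_values start_value
instance (num_of_values : Int) (input_values : List Int) (start_value : Int) (out : List Int) : Decidable (Spec_quick_postprocessing num_of_values input_values start_value out) := by unfold Spec_quick_postprocessing; infer_instance

-- ===== CLAIM (what is proved, stated in full; the proofs are below) =====
def Claim_equal_quick_postprocessing : Prop := ∀ (num_of_values : Int) (input_values : List Int) (start_value : Int), Dom_quick_postprocessing num_of_values input_values start_value → Pre_quick_postprocessing num_of_values input_values start_value → Spec_quick_postprocessing num_of_values input_values start_value (quick_postprocessing num_of_values input_values start_value)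

-- ===== LEMMAS AND PROOFS =====

theorem pv_band15 (n : Int) : PySem.Int.band n 15 = n.emod 16 := by
  have hnat : ∀ m : Nat, m &&& 15 = m % 16 := by
    intro m
    have h : (15 : Nat) = 2 ^ 4 - 1 := by norm_num
    rw [h, Nat.and_two_pow_sub_one_eq_mod]
  unfold PySem.Int.band
  split_ifs with h1 h2 h2 <;> try norm_num at *
  · -- 0 ≤ n
    rw [show ((15 : Int).toNat = 15) from rfl, hnat]
    have hm : n.emod (16 : Int) = n % 16 := rfl
    rw [hm]; omega
  · -- n < 0
    rw [show ((15 : Int).toNat = 15) from rfl, Nat.land_comm, hnat]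
    have hm : n.emod (16 : Int) = n % 16 := rfl
    rw [hm]; omega

theorem pv_foldl_seg (g1 g2 : Int → List Int) (l : List Int) (h : ∀ i ∈ l, g1 i = g2 i) (init : List Int) :
    l.foldl (fun r i => r ++ g1 i) init = l.foldl (fun r i => r ++ g2 i) init := by
  induction l generalizing init with
  | nil => rfl
  | cons x xs ih =>
      simp only [List.foldl_cons]
      rw [h x (by simp)]
      exact ih (fun i hi => h i (by simp [hi])) _

theorem pv_seg_eq (v : Int) :
    pvXorOp (pvMixBits (pvIntToBits v)) =
      [PySem.Int.band (PySem.Int.bxor (PySem.Int.band v 15 >>> 3) (PySem.Int.band v 15)) 1,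
       PySem.Int.band (PySem.Int.bxor (PySem.Int.band v 15 >>> 2) (PySem.Int.band v 15 >>> 1)) 1] := by
  have h : PySem.Int.band v 15 = v.emod 16 := pv_band15 v
  have hself : PySem.Int.band (v.emod 16) 15 = v.emod 16 := by
    rw [pv_band15]
    have : (v.emod 16).emod 16 = (v % 16) % 16 := rfl
    rw [this, Int.emod_emod_of_dvd _ (dvd_refl 16)]
    rfl
  have h2 : pvIntToBits v = pvIntToBits (v.emod 16) := by
    unfold pvIntToBits
    rw [h, hself]
  have h0 : 0 ≤ v.emod 16 := Int.emod_nonneg v (by norm_num)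
  have h1 : v.emod 16 < 16 := Int.emod_lt_of_pos v (by norm_num)
  rw [h2, h]
  generalize v.emod 16 = m at h0 h1 ⊢
  interval_cases m <;> decide

-- ===== VERDICT (by name: the statement is the Claim_ definition above) =====
theorem quick_postprocessing_spec : Claim_equal_quick_postprocessing := by
  intro n xs s _ _
  unfold Spec_quick_postprocessing quick_postprocessing quick_postprocessing_alt
  exact pv_foldl_seg _ _ _ (fun i _ => pv_seg_eq _) []
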